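-- pv_equiv track=rewrite | github.com/openstack-archive/stackalytics | stackalytics/dashboard/web.py | get_core_engineer_branch
-- ===== SOURCE A (Python) =====
-- def get_core_engineer_branch(user, modules):
--     is_core = None
--     for (module, branch) in (user.get('core') or []):
--         if module in modules:
--             is_core = branch
--             if branch == 'master':  # master is preferable, but stables are ok
--                 break
--     return is_core
-- ===== SOURCE B (Python) =====
-- def get_core_engineer_branch(user, modules):
--     branches = [branch for (module, branch) in (user.get('core') or []) if module in modules]
--     if 'master' in branches:
--         return 'master'
--     return branches[-1] if branches else None
-- ===== Notes on version B (the rewrite author's own statement) =====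
-- stated objective: simpler
-- what changed: Replaces the single-pass early-exit accumulator loop with a materialized filter of matching branches followed by a 'master' membership test and a last-element selection.
import Mathlib
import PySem

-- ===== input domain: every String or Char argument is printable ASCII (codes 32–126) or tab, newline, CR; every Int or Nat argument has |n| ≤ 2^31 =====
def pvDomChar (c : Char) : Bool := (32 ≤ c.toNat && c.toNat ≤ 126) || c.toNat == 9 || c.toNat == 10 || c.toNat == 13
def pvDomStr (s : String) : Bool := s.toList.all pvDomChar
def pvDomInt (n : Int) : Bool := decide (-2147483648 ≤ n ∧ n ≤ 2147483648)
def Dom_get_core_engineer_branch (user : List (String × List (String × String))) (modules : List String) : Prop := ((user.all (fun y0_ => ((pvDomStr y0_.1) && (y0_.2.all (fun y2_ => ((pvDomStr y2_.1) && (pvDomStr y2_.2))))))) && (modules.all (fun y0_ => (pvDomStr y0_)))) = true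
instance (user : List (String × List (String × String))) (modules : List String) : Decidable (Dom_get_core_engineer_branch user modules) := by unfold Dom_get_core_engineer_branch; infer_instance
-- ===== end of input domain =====

-- B replaces A's early-exit accumulator loop by a materialized filter of matching branches plus a 'master' membership test and last-element pick (objective: simpler).


-- ===== PORT A =====
-- the for-loop with its early break, carrying the accumulator is_core
def pvLoopA (modules : List String) : List (String × String) → Option String → Option String
  | [], is_core => is_core
  | (module, branch) :: rest, is_core =>
    if modules.contains module then
      if branch == "master" then some branch
      else pvLoopA modules rest (some branch)
    else pvLoopA modules rest is_core

-- user.get('core') or [] : a missing key and an empty list both iterate over []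
def get_core_engineer_branch (user : List (String × List (String × String))) (modules : List String) : Option String :=
  pvLoopA modules (((PySem.Dict.mk user).get? "core").getD []) none

-- ===== PORT B =====
def get_core_engineer_branch_alt (user : List (String × List (String × String))) (modules : List String) : Option String :=
  let branches := ((((PySem.Dict.mk user).get? "core").getD []).filter (fun p => modules.contains p.1)).map Prod.snd
  if branches.contains "master" then some "master"
  else branches.getLast?

-- ===== PRECONDITION & SPEC =====
def Spec_get_core_engineer_branch (user : List (String × List (String × String))) (modules : List String) (out : Option String) : Prop := out = get_core_engineer_branch_alt user modules
instance (user : List (String × List (String × String))) (modules : List String) (out : Option String) : Decidable (Spec_get_core_engineer_branch user modules out) := by unfold Spec_get_core_engineer_branch; infer_instance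

-- ===== CLAIM (what is proved, stated in full; the proofs are below) =====
def Claim_equal_get_core_engineer_branch : Prop := ∀ (user : List (String × List (String × String))) (modules : List String), Dom_get_core_engineer_branch user modules → Spec_get_core_engineer_branch user modules (get_core_engineer_branch user modules)

-- ===== LEMMAS AND PROOFS =====
theorem pv_cons_getLast?_or {α : Type} (b : α) (bs : List α) (acc : Option α) :
    ((b :: bs).getLast?).or acc = (bs.getLast?).or (some b) := by
  cases bs with
  | nil => simp
  | cons c t =>
    rw [List.getLast?_cons_cons]
    cases hgl : (c :: t).getLast? with
    | none => exact absurd (List.getLast?_eq_none_iff.mp hgl) (by simp)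
    | some x => simp [Option.or]

theorem pvLoopA_char (modules : List String) (l : List (String × String)) (acc : Option String) :
    pvLoopA modules l acc =
      (if (((l.filter (fun p => modules.contains p.1)).map Prod.snd).contains "master") = true
       then some "master"
       else (((l.filter (fun p => modules.contains p.1)).map Prod.snd).getLast?).or acc) := by
  induction l generalizing acc with
  | nil => simp [pvLoopA]
  | cons hd tl ih =>
    obtain ⟨m, b⟩ := hd
    by_cases hm : modules.contains m = true
    · rw [show (pvLoopA modules ((m, b) :: tl) acc) =
          (if b == "master" then some b else pvLoopA modules tl (some b)) by
            simp only [pvLoopA, hm, if_pos]]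
      simp only [List.filter_cons, hm, if_true, List.map_cons]
      by_cases hb : b = "master"
      · subst hb
        simp
      · have hb2 : (b == "master") = false := by simp [hb]
        rw [hb2, if_neg (by simp), ih]
        have hmb : ("master" == b) = false := by
          simp only [beq_eq_false_iff_ne, ne_eq]; exact fun h => hb h.symm
        rw [List.contains_cons, hmb, Bool.false_or]
        by_cases hmem : ((tl.filter (fun p => modules.contains p.1)).map Prod.snd).contains "master" = true
        · rw [if_pos hmem, if_pos hmem]
        · rw [if_neg hmem, if_neg hmem, pv_cons_getLast?_or]
    · rw [show (pvLoopA modules ((m, b) :: tl) acc) = pvLoopA modules tl acc by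
          simp only [pvLoopA, hm]; rfl]
      simp only [List.filter_cons]
      rw [if_neg hm, ih]

-- ===== VERDICT (by name: the statement is the Claim_ definition above) =====
theorem get_core_engineer_branch_spec : Claim_equal_get_core_engineer_branch := by
  intro user modules _
  unfold Spec_get_core_engineer_branch get_core_engineer_branch get_core_engineer_branch_alt
  rw [pvLoopA_char]
  simp [Option.or_none]
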